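-- pv_equiv track=rewrite | github.com/mikedotexe/reptends | bridge_reptends/coset.py | get_block_remainders
-- ===== SOURCE A (Python) =====
-- def get_block_remainders(
--     numerator: int,
--     p: int,
--     d: int,
--     n_blocks: int
-- ) -> list[int]:
--     """
--     Get the sequence of block-start remainders.
--
--     These are: a, a*d, a*d², a*d³, ... (mod p)
--
--     This shows how the gap d traverses within the coset.
--     """
--     remainders = []
--     r = numerator % p
--     for _ in range(n_blocks):
--         remainders.append(r)
--         r = (r * d) % p
--     return remainders
-- ===== SOURCE B (Python) =====
-- def get_block_remainders(
--     numerator: int,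
--     p: int,
--     d: int,
--     n_blocks: int
-- ) -> list[int]:
--     """Each term computed independently in closed form: a*d^k mod p via 3-arg pow."""
--     a = numerator % p
--     return [a * pow(d, k, p) % p for k in range(n_blocks)]
-- ===== Notes on version B (the rewrite author's own statement) =====
-- stated objective: alternative
-- what changed: Replaces the running-product accumulator loop with a closed-form per-term computation a*pow(d,k,p)%p over range(n_blocks), so no term depends on the previous one.
import Mathlib
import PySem

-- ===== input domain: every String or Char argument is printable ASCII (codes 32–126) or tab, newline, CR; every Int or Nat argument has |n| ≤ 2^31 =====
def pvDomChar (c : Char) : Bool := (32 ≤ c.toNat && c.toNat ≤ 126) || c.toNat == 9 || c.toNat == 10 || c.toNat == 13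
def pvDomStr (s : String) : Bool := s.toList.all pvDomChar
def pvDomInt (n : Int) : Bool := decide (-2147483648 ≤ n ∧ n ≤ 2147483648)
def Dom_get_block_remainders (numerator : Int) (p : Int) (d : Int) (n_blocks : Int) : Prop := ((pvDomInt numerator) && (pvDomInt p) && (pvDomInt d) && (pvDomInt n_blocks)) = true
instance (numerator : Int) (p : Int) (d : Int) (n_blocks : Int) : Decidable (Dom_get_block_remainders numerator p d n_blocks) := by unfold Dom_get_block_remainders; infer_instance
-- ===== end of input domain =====

-- B computes each term independently in closed form (a*pow(d,k,p)%p) instead of A's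
-- running-product accumulator; equal cost class, different decomposition.

-- ===== PORT A =====
def get_block_remainders (numerator : Int) (p : Int) (d : Int) (n_blocks : Int) : List Int :=
  -- remainders = []; r = numerator % p; for _ in range(n_blocks): append r; r = (r*d) % p
  ((PySem.List.pyRange 0 n_blocks 1).foldl
    (fun (st : List Int × Int) _ => (st.1 ++ [st.2], PySem.Int.mod (st.2 * d) p))
    (([] : List Int), PySem.Int.mod numerator p)).1

-- ===== PORT B =====
def get_block_remainders_alt (numerator : Int) (p : Int) (d : Int) (n_blocks : Int) : List Int :=
  -- a = numerator % p; [a * pow(d, k, p) % p for k in range(n_blocks)]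
  let a := PySem.Int.mod numerator p
  (PySem.List.pyRange 0 n_blocks 1).map
    (fun k => PySem.Int.mod (a * PySem.Int.powMod d k.toNat p) p)

-- ===== PRECONDITION & SPEC =====
-- Pre_ excludes exactly p = 0, where Python A raises ZeroDivisionError.
def Pre_get_block_remainders (numerator : Int) (p : Int) (d : Int) (n_blocks : Int) : Prop := p ≠ 0
instance (numerator : Int) (p : Int) (d : Int) (n_blocks : Int) : Decidable (Pre_get_block_remainders numerator p d n_blocks) := by unfold Pre_get_block_remainders; infer_instance
def pvWitness_get_block_remainders : Int × Int × Int × Int := (10, 7, 3, 5)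
def Spec_get_block_remainders (numerator : Int) (p : Int) (d : Int) (n_blocks : Int) (out : List Int) : Prop := out = get_block_remainders_alt numerator p d n_blocks
instance (numerator : Int) (p : Int) (d : Int) (n_blocks : Int) (out : List Int) : Decidable (Spec_get_block_remainders numerator p d n_blocks out) := by unfold Spec_get_block_remainders; infer_instance

-- ===== CLAIM (what is proved, stated in full; the proofs are below) =====
def Claim_equal_get_block_remainders : Prop := ∀ (numerator : Int) (p : Int) (d : Int) (n_blocks : Int), Dom_get_block_remainders numerator p d n_blocks → Pre_get_block_remainders numerator p d n_blocks → Spec_get_block_remainders numerator p d n_blocks (get_block_remainders numerator p d n_blocks)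

-- ===== LEMMAS AND PROOFS =====

-- reducing one factor mod p does not change a product mod p (Python % = fmod)
theorem pymod_mul_left (a b p : Int) :
    PySem.Int.mod (PySem.Int.mod a p * b) p = PySem.Int.mod (a * b) p := by
  simp only [PySem.Int.mod]
  rw [Int.mul_fmod, Int.fmod_fmod, ← Int.mul_fmod]

theorem pymod_mul_right (a b p : Int) :
    PySem.Int.mod (a * PySem.Int.mod b p) p = PySem.Int.mod (a * b) p := by
  rw [mul_comm, pymod_mul_left, mul_comm]

-- A's loop over range(m) yields B's closed-form list, with the invariant that the
-- carried remainder after m steps is (numerator * d^m) mod p.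
theorem loop_eq (numerator p d : Int) (m : Nat) :
    ((PySem.List.pyRange 0 (m : Int) 1).foldl
      (fun (st : List Int × Int) _ => (st.1 ++ [st.2], PySem.Int.mod (st.2 * d) p))
      (([] : List Int), PySem.Int.mod numerator p))
    = ((PySem.List.pyRange 0 (m : Int) 1).map
        (fun k => PySem.Int.mod (PySem.Int.mod numerator p * PySem.Int.powMod d k.toNat p) p),
       PySem.Int.mod (numerator * d ^ m) p) := by
  induction m with
  | zero => simp [PySem.List.pyRange_one_eq_nil]
  | succ m ih =>
    have h : ((m : Int) + 1) = ((m + 1 : Nat) : Int) := by push_cast; ring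
    rw [← h, PySem.List.pyRange_one_succ_right (by positivity), List.foldl_append,
        List.map_append, ih]
    simp only [List.foldl_cons, List.foldl_nil, List.map_cons, List.map_nil, Int.toNat_natCast,
      PySem.Int.powMod]
    rw [Prod.mk.injEq]
    constructor
    · rw [pymod_mul_right, pymod_mul_left]
    · rw [pymod_mul_left, pow_succ, mul_assoc]

-- ===== VERDICT (by name: the statement is the Claim_ definition above) =====
theorem get_block_remainders_spec : Claim_equal_get_block_remainders := by
  intro numerator p d n_blocks _ _
  unfold Spec_get_block_remainders get_block_remainders get_block_remainders_alt
  by_cases hn : n_blocks ≤ 0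
  · simp [PySem.List.pyRange_one_eq_nil (by omega : n_blocks ≤ 0)]
  · have h : n_blocks = ((n_blocks.toNat : Nat) : Int) := by omega
    rw [h, loop_eq]
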